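-- pv_equiv track=rewrite | github.com/ryanlcason2010-pixel/Bot_ConChat | framework-assistant/handlers/sequencing.py | categorize_related_frameworks
-- ===== SOURCE A (Python) =====
-- from typing import Dict, Any, List, Tuple, Optional
--
-- def categorize_related_frameworks(
--     anchor: Dict[str, Any],
--     related: List[Dict[str, Any]]
-- ) -> Dict[str, List[Dict[str, Any]]]:
--     """
--     Categorize related frameworks by relationship type.
--
--     Uses difficulty level and domain overlap as heuristics.
--
--     Args:
--         anchor: Anchor framework
--         related: List of related frameworks
--
--     Returns:
--         Dict with 'prerequisites', 'complementary', 'follow_ups' keys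
--     """
--     anchor_difficulty = _difficulty_to_num(anchor.get('difficulty_level', 'intermediate'))
--     anchor_domains = set(d.strip().lower() for d in anchor.get('business_domains', '').split(','))
--
--     categories = {
--         'prerequisites': [],
--         'complementary': [],
--         'follow_ups': []
--     }
--
--     for rf in related:
--         rf_difficulty = _difficulty_to_num(rf.get('difficulty_level', 'intermediate'))
--         rf_domains = set(d.strip().lower() for d in rf.get('business_domains', '').split(','))
--
--         # Domain overlap
--         overlap = len(anchor_domains & rf_domains)
--
--         # Heuristic categorization
--         if rf_difficulty < anchor_difficulty:
--             # Simpler frameworks are likely prerequisites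
--             categories['prerequisites'].append(rf)
--         elif rf_difficulty > anchor_difficulty:
--             # More complex frameworks are likely follow-ups
--             categories['follow_ups'].append(rf)
--         elif overlap > 0:
--             # Same difficulty with domain overlap = complementary
--             categories['complementary'].append(rf)
--         else:
--             # Default to follow-ups
--             categories['follow_ups'].append(rf)
--
--     return categories
--
-- def _difficulty_to_num(difficulty: str) -> int:
--     """Convert difficulty string to number for comparison."""
--     mapping = {
--         'beginner': 1,
--         'intermediate': 2,
--         'advanced': 3
--     }
--     return mapping.get(difficulty.lower(), 2)
-- ===== SOURCE B (Python) =====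
-- def _difficulty_to_num(difficulty: str) -> int:
--     mapping = {
--         'beginner': 1,
--         'intermediate': 2,
--         'advanced': 3
--     }
--     return mapping.get(difficulty.lower(), 2)
--
--
-- def categorize_related_frameworks(anchor, related):
--     a_diff = _difficulty_to_num(anchor.get('difficulty_level', 'intermediate'))
--     a_doms = set(d.strip().lower() for d in anchor.get('business_domains', '').split(','))
--
--     def diff(rf):
--         return _difficulty_to_num(rf.get('difficulty_level', 'intermediate'))
--
--     def overlaps(rf):
--         return any(d.strip().lower() in a_doms
--                    for d in rf.get('business_domains', '').split(','))
--
--     return {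
--         'prerequisites': [rf for rf in related if diff(rf) < a_diff],
--         'complementary': [rf for rf in related
--                           if diff(rf) == a_diff and overlaps(rf)],
--         'follow_ups': [rf for rf in related
--                        if diff(rf) > a_diff
--                        or (diff(rf) == a_diff and not overlaps(rf))],
--     }
-- ===== Notes on version B (the rewrite author's own statement) =====
-- stated objective: alternative
-- what changed: Replaces the single cascading loop that appends into a mutable dict by three independent list comprehensions (one predicate per category), and replaces the per-framework set construction plus intersection-length test by an early-exiting any(...in anchor_domains) membership test.
import Mathlib
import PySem

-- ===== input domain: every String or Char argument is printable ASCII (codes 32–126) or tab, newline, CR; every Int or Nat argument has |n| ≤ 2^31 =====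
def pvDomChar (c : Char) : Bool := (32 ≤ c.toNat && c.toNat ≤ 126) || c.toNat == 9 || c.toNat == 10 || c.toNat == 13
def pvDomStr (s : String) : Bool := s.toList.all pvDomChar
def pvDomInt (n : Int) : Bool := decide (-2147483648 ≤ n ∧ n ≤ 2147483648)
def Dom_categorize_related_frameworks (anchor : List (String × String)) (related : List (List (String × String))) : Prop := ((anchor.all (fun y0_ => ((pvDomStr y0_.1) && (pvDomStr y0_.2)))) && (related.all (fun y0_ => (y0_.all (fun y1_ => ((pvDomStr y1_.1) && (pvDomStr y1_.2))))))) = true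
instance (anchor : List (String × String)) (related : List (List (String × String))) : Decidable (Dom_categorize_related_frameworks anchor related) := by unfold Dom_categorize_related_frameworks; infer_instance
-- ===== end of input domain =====

-- B replaces A's cascading loop over a mutable dict by three independent filters (one
-- predicate per category) and the per-framework set-intersection count by an
-- early-exiting membership test; objective: alternative decomposition, same cost.

-- ===== PORT A =====
-- s.split(',') with a nonempty literal separator: Str.split? is total here (sep ≠ "")
def pySplitComma (s : String) : List String := (PySem.Str.split? s ",").getD []

-- module helper _difficulty_to_num (shared by both Pythons)
def difficultyToNum (difficulty : String) : Int :=
  let mapping : PySem.Dict String Int :=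
    PySem.Dict.ofList [("beginner", 1), ("intermediate", 2), ("advanced", 3)]
  mapping.getD (PySem.Str.lower difficulty) 2

-- set(d.strip().lower() for d in fw.get('business_domains','').split(','))
def frameworkDomains (fw : List (String × String)) : PySem.Set String :=
  PySem.Set.ofList
    ((pySplitComma (PySem.Dict.getD (PySem.Dict.mk fw) "business_domains" "")).map
      (fun d => PySem.Str.lower (PySem.Str.strip d)))

def categorize_related_frameworks (anchor : List (String × String)) (related : List (List (String × String))) : List (String × List (List (String × String))) :=
  let anchor_difficulty := difficultyToNum (PySem.Dict.getD (PySem.Dict.mk anchor) "difficulty_level" "intermediate")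
  let anchor_domains := frameworkDomains anchor
  let categories : PySem.Dict String (List (List (String × String))) :=
    PySem.Dict.ofList [("prerequisites", []), ("complementary", []), ("follow_ups", [])]
  related.foldl
    (fun cats rf =>
      let rf_difficulty := difficultyToNum (PySem.Dict.getD (PySem.Dict.mk rf) "difficulty_level" "intermediate")
      let rf_domains := frameworkDomains rf
      let overlap : Int := PySem.Set.len (PySem.Set.inter anchor_domains rf_domains)
      if rf_difficulty < anchor_difficulty then
        PySem.Dict.modify cats "prerequisites" [] (fun l => l ++ [rf])
      else if rf_difficulty > anchor_difficulty then
        PySem.Dict.modify cats "follow_ups" [] (fun l => l ++ [rf])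
      else if overlap > 0 then
        PySem.Dict.modify cats "complementary" [] (fun l => l ++ [rf])
      else
        PySem.Dict.modify cats "follow_ups" [] (fun l => l ++ [rf]))
    categories |>.items

-- ===== PORT B =====
def categorize_related_frameworks_alt (anchor : List (String × String)) (related : List (List (String × String))) : List (String × List (List (String × String))) :=
  let a_diff := difficultyToNum (PySem.Dict.getD (PySem.Dict.mk anchor) "difficulty_level" "intermediate")
  let a_doms : PySem.Set String :=
    PySem.Set.ofList
      ((pySplitComma (PySem.Dict.getD (PySem.Dict.mk anchor) "business_domains" "")).map
        (fun d => PySem.Str.lower (PySem.Str.strip d)))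
  let diff := fun (rf : List (String × String)) =>
    difficultyToNum (PySem.Dict.getD (PySem.Dict.mk rf) "difficulty_level" "intermediate")
  let overlaps := fun (rf : List (String × String)) =>
    (pySplitComma (PySem.Dict.getD (PySem.Dict.mk rf) "business_domains" "")).any
      (fun d => PySem.Set.contains a_doms (PySem.Str.lower (PySem.Str.strip d)))
  [("prerequisites", related.filter (fun rf => diff rf < a_diff)),
   ("complementary", related.filter (fun rf => diff rf == a_diff && overlaps rf)),
   ("follow_ups", related.filter (fun rf => diff rf > a_diff || (diff rf == a_diff && !overlaps rf)))]

-- ===== PRECONDITION & SPEC =====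
def Spec_categorize_related_frameworks (anchor : List (String × String)) (related : List (List (String × String))) (out : List (String × List (List (String × String)))) : Prop := out = categorize_related_frameworks_alt anchor related
instance (anchor : List (String × String)) (related : List (List (String × String))) (out : List (String × List (List (String × String)))) : Decidable (Spec_categorize_related_frameworks anchor related out) := by unfold Spec_categorize_related_frameworks; infer_instance

-- ===== CLAIM (what is proved, stated in full; the proofs are below) =====
def Claim_equal_categorize_related_frameworks : Prop := ∀ (anchor : List (String × String)) (related : List (List (String × String))), Dom_categorize_related_frameworks anchor related → Spec_categorize_related_frameworks anchor related (categorize_related_frameworks anchor related)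

-- ===== LEMMAS AND PROOFS =====

-- 0 < |anchor_domains & set(map f l)|  iff  some element of l hits anchor_domains after f
theorem crf_overlaps_iff (aDoms : PySem.Set String) (l : List String) (f : String → String) :
    0 < PySem.Set.len (PySem.Set.inter aDoms (PySem.Set.ofList (l.map f)))
      ↔ l.any (fun d => PySem.Set.contains aDoms (f d)) = true := by
  have h0 : 0 < PySem.Set.len (PySem.Set.inter aDoms (PySem.Set.ofList (l.map f)))
      ↔ ∃ y, y ∈ PySem.Set.inter aDoms (PySem.Set.ofList (l.map f)) := by
    unfold PySem.Set.len
    rw [Int.natCast_pos]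
    exact List.length_pos_iff_exists_mem
  rw [h0]
  simp only [PySem.Set.mem_inter, PySem.Set.mem_ofList, List.mem_map, List.any_eq_true,
    PySem.Set.contains_iff]
  constructor
  · rintro ⟨y, hy, d, hd, rfl⟩
    exact ⟨d, hd, hy⟩
  · rintro ⟨d, hd, hy⟩
    exact ⟨f d, hy, d, hd, rfl⟩

theorem crf_modify_pre (p c f : List (List (String × String)))
    (g : List (List (String × String)) → List (List (String × String))) :
    PySem.Dict.modify (PySem.Dict.mk [("prerequisites", p), ("complementary", c), ("follow_ups", f)])
        "prerequisites" [] g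
      = PySem.Dict.mk [("prerequisites", g p), ("complementary", c), ("follow_ups", f)] := by
  simp [PySem.Dict.modify, PySem.Dict.insert, PySem.Dict.contains, PySem.Dict.getD,
    PySem.Dict.get?, PySem.Dict.items, List.find?]

theorem crf_modify_comp (p c f : List (List (String × String)))
    (g : List (List (String × String)) → List (List (String × String))) :
    PySem.Dict.modify (PySem.Dict.mk [("prerequisites", p), ("complementary", c), ("follow_ups", f)])
        "complementary" [] g
      = PySem.Dict.mk [("prerequisites", p), ("complementary", g c), ("follow_ups", f)] := by
  simp [PySem.Dict.modify, PySem.Dict.insert, PySem.Dict.contains, PySem.Dict.getD,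
    PySem.Dict.get?, PySem.Dict.items, List.find?]

theorem crf_modify_fol (p c f : List (List (String × String)))
    (g : List (List (String × String)) → List (List (String × String))) :
    PySem.Dict.modify (PySem.Dict.mk [("prerequisites", p), ("complementary", c), ("follow_ups", f)])
        "follow_ups" [] g
      = PySem.Dict.mk [("prerequisites", p), ("complementary", c), ("follow_ups", g f)] := by
  simp [PySem.Dict.modify, PySem.Dict.insert, PySem.Dict.contains, PySem.Dict.getD,
    PySem.Dict.get?, PySem.Dict.items, List.find?]

-- the loop of A, over abstract difficulty/domain extractors, computes B's three filters
theorem crf_foldl_aux (aDiff : Int) (aDoms : PySem.Set String)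
    (dd : List (String × String) → Int) (sp : List (String × String) → List String)
    (f : String → String) (related : List (List (String × String)))
    (p c f3 : List (List (String × String))) :
    related.foldl
      (fun cats rf =>
        if dd rf < aDiff then
          PySem.Dict.modify cats "prerequisites" [] (fun l => l ++ [rf])
        else if dd rf > aDiff then
          PySem.Dict.modify cats "follow_ups" [] (fun l => l ++ [rf])
        else if PySem.Set.len (PySem.Set.inter aDoms (PySem.Set.ofList ((sp rf).map f))) > 0 then
          PySem.Dict.modify cats "complementary" [] (fun l => l ++ [rf])
        else
          PySem.Dict.modify cats "follow_ups" [] (fun l => l ++ [rf]))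
      (PySem.Dict.mk [("prerequisites", p), ("complementary", c), ("follow_ups", f3)])
    = PySem.Dict.mk
        [("prerequisites", p ++ related.filter (fun rf => dd rf < aDiff)),
         ("complementary", c ++ related.filter (fun rf =>
            dd rf == aDiff && (sp rf).any (fun d => PySem.Set.contains aDoms (f d)))),
         ("follow_ups", f3 ++ related.filter (fun rf =>
            dd rf > aDiff || (dd rf == aDiff
              && !(sp rf).any (fun d => PySem.Set.contains aDoms (f d)))))] := by
  induction related generalizing p c f3 with
  | nil => simp
  | cons rf rest ih =>
    rw [List.foldl_cons]
    rcases lt_trichotomy (dd rf) aDiff with h | h | h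
    · have hne : (dd rf == aDiff) = false := by simp [h.ne]
      have hgt : ¬ dd rf > aDiff := not_lt.mpr h.le
      rw [if_pos h, crf_modify_pre, ih]
      simp [h, hne, hgt]
    · have hlt : ¬ dd rf < aDiff := by omega
      have hgt : ¬ dd rf > aDiff := by omega
      have hne : (dd rf == aDiff) = true := by simp [h]
      rw [if_neg hlt, if_neg hgt]
      by_cases hov : ((sp rf).any fun d => PySem.Set.contains aDoms (f d)) = true
      · have hex := hov
        simp only [List.any_eq_true, PySem.Set.contains_iff] at hex
        rw [if_pos ((crf_overlaps_iff aDoms (sp rf) f).mpr hov), crf_modify_comp, ih]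
        simp [h, hex]
      · have hex : ¬ ∃ x ∈ sp rf, f x ∈ aDoms := by
          simpa only [List.any_eq_true, PySem.Set.contains_iff] using hov
        rw [if_neg (fun hl => hov ((crf_overlaps_iff aDoms (sp rf) f).mp hl)),
          crf_modify_fol, ih]
        simp [List.filter_cons, h, hne, hov, hex]
    · have hlt : ¬ dd rf < aDiff := by omega
      have hne : (dd rf == aDiff) = false := by simp [h.ne']
      rw [if_neg hlt, if_pos h, crf_modify_fol, ih]
      simp [h, hne, hlt]

theorem crf_combined (aDiff : Int) (aDoms : PySem.Set String)
    (dd : List (String × String) → Int) (sp : List (String × String) → List String)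
    (f : String → String) (related : List (List (String × String))) :
    (related.foldl
      (fun cats rf =>
        if dd rf < aDiff then
          PySem.Dict.modify cats "prerequisites" [] (fun l => l ++ [rf])
        else if dd rf > aDiff then
          PySem.Dict.modify cats "follow_ups" [] (fun l => l ++ [rf])
        else if PySem.Set.len (PySem.Set.inter aDoms (PySem.Set.ofList ((sp rf).map f))) > 0 then
          PySem.Dict.modify cats "complementary" [] (fun l => l ++ [rf])
        else
          PySem.Dict.modify cats "follow_ups" [] (fun l => l ++ [rf]))
      (PySem.Dict.mk [("prerequisites", []), ("complementary", []), ("follow_ups", [])])).items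
    = [("prerequisites", related.filter (fun rf => dd rf < aDiff)),
       ("complementary", related.filter (fun rf =>
          dd rf == aDiff && (sp rf).any (fun d => PySem.Set.contains aDoms (f d)))),
       ("follow_ups", related.filter (fun rf =>
          dd rf > aDiff || (dd rf == aDiff
            && !(sp rf).any (fun d => PySem.Set.contains aDoms (f d)))))] := by
  rw [crf_foldl_aux]
  simp

-- ===== VERDICT (by name: the statement is the Claim_ definition above) =====
theorem categorize_related_frameworks_spec : Claim_equal_categorize_related_frameworks := by
  intro anchor related _
  show categorize_related_frameworks anchor related
      = categorize_related_frameworks_alt anchor related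
  exact crf_combined
    (difficultyToNum (PySem.Dict.getD (PySem.Dict.mk anchor) "difficulty_level" "intermediate"))
    (frameworkDomains anchor)
    (fun rf => difficultyToNum (PySem.Dict.getD (PySem.Dict.mk rf) "difficulty_level" "intermediate"))
    (fun rf => pySplitComma (PySem.Dict.getD (PySem.Dict.mk rf) "business_domains" ""))
    (fun d => PySem.Str.lower (PySem.Str.strip d))
    related
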